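-- pv_equiv track=rewrite | github.com/dcrespo3d/CelesteNext | zxnext/scripts/convert_sprites.py | create_palette_substitutions
-- ===== SOURCE A (Python) =====
-- def create_palette_substitutions(pal333arr, subst_index):
--     result = []
--     for isubpal in range(16):
--         for idx in range(len(pal333arr)):
--             if isubpal > 0 and idx == subst_index:
--                 if isubpal - 1 == subst_index:
--                     entry = '0007'
--                 else:
--                     entry = pal333arr[isubpal - 1]
--             else:
--                 entry = pal333arr[idx]
--             result.append(entry)
--     return result
-- ===== SOURCE B (Python) =====
-- def create_palette_substitutions(pal333arr, subst_index):
--     n = len(pal333arr)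
--     flat = list(pal333arr) * 16
--     if 0 <= subst_index < n:
--         for isubpal in range(1, 16):
--             flat[isubpal * n + subst_index] = '0007' if isubpal - 1 == subst_index else pal333arr[isubpal - 1]
--     return flat
-- ===== Notes on version B (the rewrite author's own statement) =====
-- stated objective: alternative
-- what changed: B builds the whole output at once as the palette replicated 16 times (list * 16, one bulk copy) and then point-patches the 15 substitution cells through flat-index arithmetic (isubpal*n + subst_index), eliminating A's nested per-element loops.
import Mathlib
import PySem

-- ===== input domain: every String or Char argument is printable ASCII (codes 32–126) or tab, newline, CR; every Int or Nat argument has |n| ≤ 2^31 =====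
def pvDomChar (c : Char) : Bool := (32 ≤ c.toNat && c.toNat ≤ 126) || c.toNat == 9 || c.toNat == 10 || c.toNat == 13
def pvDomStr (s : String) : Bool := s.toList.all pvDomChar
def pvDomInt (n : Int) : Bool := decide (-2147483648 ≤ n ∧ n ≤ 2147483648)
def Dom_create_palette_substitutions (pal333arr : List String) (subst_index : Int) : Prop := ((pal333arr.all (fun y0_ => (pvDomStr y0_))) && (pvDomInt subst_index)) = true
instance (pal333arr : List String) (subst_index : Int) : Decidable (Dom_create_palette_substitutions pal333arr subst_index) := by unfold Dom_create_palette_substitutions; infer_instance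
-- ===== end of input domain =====

-- B replicates the whole palette 16 times in one step and then point-patches the 15
-- substitution cells by flat-index arithmetic, instead of A's nested per-element loops
-- (objective: alternative decomposition — one bulk replication plus 15 point patches).

-- ===== PORT A =====
def create_palette_substitutions (pal333arr : List String) (subst_index : Int) : List String :=
  (PySem.List.pyRange 0 16 1).foldl (fun result isubpal =>
    (PySem.List.pyRange 0 (PySem.List.len pal333arr) 1).foldl (fun result idx =>
      let entry :=
        if isubpal > 0 ∧ idx = subst_index then
          if isubpal - 1 = subst_index then "0007"
          else PySem.List.pyGetD pal333arr (isubpal - 1) ""   -- IndexError excluded by Pre_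
        else PySem.List.pyGetD pal333arr idx ""
      result ++ [entry]) result) []

-- ===== PORT B =====
def create_palette_substitutions_alt (pal333arr : List String) (subst_index : Int) : List String :=
  let n : Int := PySem.List.len pal333arr
  let flat := PySem.List.pyRepeat pal333arr 16
  if 0 ≤ subst_index ∧ subst_index < n then
    (PySem.List.pyRange 1 16 1).foldl (fun flat isubpal =>
      PySem.List.pySetD flat (isubpal * n + subst_index)
        (if isubpal - 1 = subst_index then "0007"
         else PySem.List.pyGetD pal333arr (isubpal - 1) "")) flat   -- IndexError excluded by Pre_
  else flat

-- ===== PRECONDITION & SPEC =====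
-- Pre_ excludes exactly the inputs on which A raises IndexError (B raises it identically):
-- a substitution index that hits the palette (0 ≤ subst_index < len) while the palette has
-- fewer than 15 entries, so pal333arr[isubpal-1] overruns for some isubpal in 1..15.
def Pre_create_palette_substitutions (pal333arr : List String) (subst_index : Int) : Prop :=
  (0 ≤ subst_index ∧ subst_index < (pal333arr.length : Int)) → 15 ≤ pal333arr.length
instance (pal333arr : List String) (subst_index : Int) : Decidable (Pre_create_palette_substitutions pal333arr subst_index) := by unfold Pre_create_palette_substitutions; infer_instance

def pvWitness_create_palette_substitutions : List String × Int := (["007", "123"], 5)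

def Spec_create_palette_substitutions (pal333arr : List String) (subst_index : Int) (out : List String) : Prop := out = create_palette_substitutions_alt pal333arr subst_index
instance (pal333arr : List String) (subst_index : Int) (out : List String) : Decidable (Spec_create_palette_substitutions pal333arr subst_index out) := by unfold Spec_create_palette_substitutions; infer_instance

-- ===== CLAIM (what is proved, stated in full; the proofs are below) =====
def Claim_equal_create_palette_substitutions : Prop := ∀ (pal333arr : List String) (subst_index : Int), Dom_create_palette_substitutions pal333arr subst_index → Pre_create_palette_substitutions pal333arr subst_index → Spec_create_palette_substitutions pal333arr subst_index (create_palette_substitutions pal333arr subst_index)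

-- ===== LEMMAS AND PROOFS =====

-- the idx-loop of A for one subpalette, as a map over the index range
def pvRowA (pal333arr : List String) (subst_index : Int) (isubpal : Int) : List String :=
  (PySem.List.pyRange 0 (pal333arr.length : Int) 1).map (fun idx =>
    if isubpal > 0 ∧ idx = subst_index then
      if isubpal - 1 = subst_index then "0007"
      else PySem.List.pyGetD pal333arr (isubpal - 1) ""
    else PySem.List.pyGetD pal333arr idx "")

lemma pvRowA_zero_lt (pal : List String) (si : Int) (isubpal : Int) (h : ¬ isubpal > 0) :
    pvRowA pal si isubpal = pal := by
  unfold pvRowA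
  have : ∀ idx, (if isubpal > 0 ∧ idx = si then
      (if isubpal - 1 = si then "0007" else PySem.List.pyGetD pal (isubpal - 1) "")
      else PySem.List.pyGetD pal idx "") = PySem.List.pyGetD pal idx "" := by
    intro idx; simp [h]
  simp only [this]
  exact PySem.List.map_pyGetD_pyRange_zero' pal ""

lemma pvRowA_no_hit (pal : List String) (si : Int) (isubpal : Int)
    (h : ¬ (0 ≤ si ∧ si < (pal.length : Int))) :
    pvRowA pal si isubpal = pal := by
  unfold pvRowA
  rw [List.map_congr_left (g := fun idx => PySem.List.pyGetD pal idx "")]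
  · exact PySem.List.map_pyGetD_pyRange_zero' pal ""
  · intro idx hidx
    have hm := (PySem.List.mem_pyRange_one).1 hidx
    have : idx ≠ si := by intro he; exact h (he ▸ ⟨hm.1, hm.2⟩)
    simp [this]

lemma pvRowA_hit (pal : List String) (si : Int) (isubpal : Int)
    (hpos : isubpal > 0) (h : 0 ≤ si ∧ si < (pal.length : Int)) :
    pvRowA pal si isubpal =
      pal.set si.toNat (if isubpal - 1 = si then "0007"
        else PySem.List.pyGetD pal (isubpal - 1) "") := by
  unfold pvRowA
  apply List.ext_getElem
  · simp [PySem.List.length_pyRange_one]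
  · intro k hk1 hk2
    have hklen : k < pal.length := by
      simp [PySem.List.length_pyRange_one] at hk1; omega
    simp only [List.getElem_map, PySem.List.getElem_pyRange_one, zero_add]
    rw [List.getElem_set]
    by_cases hks : (k : Int) = si
    · have : si.toNat = k := by omega
      simp [hks, hpos, this]
    · have : si.toNat ≠ k := by omega
      simp [hks, this, PySem.List.pyGetD_natCast, List.getD_eq_getElem?_getD,
            List.getElem?_eq_getElem hklen]

-- A's whole result is the concatenation of its 16 rows
lemma pvA_eq_flatten (pal : List String) (si : Int) :
    create_palette_substitutions pal si
      = ((PySem.List.pyRange 0 16 1).map (pvRowA pal si)).flatten := by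
  simp only [create_palette_substitutions, PySem.List.len_eq]
  have hA : ∀ (acc : List String) (isubpal : Int),
      (PySem.List.pyRange 0 (pal.length : Int) 1).foldl (fun result idx =>
        result ++ [if isubpal > 0 ∧ idx = si then
            if isubpal - 1 = si then "0007" else PySem.List.pyGetD pal (isubpal - 1) ""
          else PySem.List.pyGetD pal idx ""]) acc
      = acc ++ pvRowA pal si isubpal := by
    intro acc isubpal
    exact PySem.List.foldl_append_singleton_eq_map _ _ _
  calc (PySem.List.pyRange 0 16 1).foldl (fun result isubpal =>
        (PySem.List.pyRange 0 (pal.length : Int) 1).foldl (fun result idx =>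
          result ++ [if isubpal > 0 ∧ idx = si then
              if isubpal - 1 = si then "0007" else PySem.List.pyGetD pal (isubpal - 1) ""
            else PySem.List.pyGetD pal idx ""]) result) []
      = (PySem.List.pyRange 0 16 1).foldl (fun acc isubpal => acc ++ pvRowA pal si isubpal) [] := by
        apply PySem.List.foldl_congr_mem; intro acc x _; exact hA acc x
    _ = ((PySem.List.pyRange 0 16 1).map (pvRowA pal si)).foldl (fun acc r => acc ++ r) [] := by
        rw [List.foldl_map]
    _ = ((PySem.List.pyRange 0 16 1).map (pvRowA pal si)).flatten := by
        rw [PySem.List.foldl_append_eq_flatten]; simp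

-- B's patch loop, generalized: sets at flat indices i*len+si across a replicated tail
lemma pvPatch_flatten (pal : List String) (si : Int) (v : Int → String)
    (h0 : 0 ≤ si) (hlt : si.toNat < pal.length) :
    ∀ (k : Nat) (m : Int) (pre : List String), 0 ≤ m → pre.length = m.toNat * pal.length →
      (PySem.List.pyRange m (m + k) 1).foldl
        (fun flat i => PySem.List.pySetD flat (i * (pal.length : Int) + si) (v i))
        (pre ++ (List.replicate k pal).flatten)
      = pre ++ ((PySem.List.pyRange m (m + k) 1).map (fun i => pal.set si.toNat (v i))).flatten := by
  intro k
  induction k with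
  | zero =>
    intro m pre _ _
    rw [PySem.List.pyRange_one_eq_nil (by omega)]
    simp
  | succ k ih =>
    intro m pre hm hpre
    have hcons : PySem.List.pyRange m (m + (k + 1 : Nat)) 1
        = m :: PySem.List.pyRange (m + 1) (m + (k + 1 : Nat)) 1 :=
      PySem.List.pyRange_one_cons (by push_cast; omega)
    rw [hcons]
    simp only [List.foldl_cons, List.map_cons, List.flatten_cons]
    have hidx : (m * (pal.length : Int) + si).toNat = pre.length + si.toNat := by
      have h1 : m * (pal.length : Int) = ((m.toNat * pal.length : Nat) : Int) := by
        push_cast [Int.toNat_of_nonneg hm]; ring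
      rw [h1, hpre]; omega
    have hnn : (0 : Int) ≤ m * (pal.length : Int) + si :=
      add_nonneg (mul_nonneg hm (by positivity)) h0
    rw [List.replicate_succ, List.flatten_cons,
        PySem.List.pySetD_of_nonneg _ _ hnn, hidx]
    have hset : (pre ++ (pal ++ (List.replicate k pal).flatten)).set (pre.length + si.toNat) (v m)
        = (pre ++ pal.set si.toNat (v m)) ++ (List.replicate k pal).flatten := by
      simp [hlt]
    rw [hset]
    have hstep : m + ((k : Int) + 1) = (m + 1) + k := by ring
    have := ih (m + 1) (pre ++ pal.set si.toNat (v m)) (by omega)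
      (by simp [hpre]; have : (m + 1).toNat = m.toNat + 1 := by omega
          rw [this]; ring)
    push_cast at this ⊢
    rw [hstep, this]
    simp

theorem create_palette_substitutions_spec_proof (pal : List String) (si : Int) :
    create_palette_substitutions pal si = create_palette_substitutions_alt pal si := by
  simp only [create_palette_substitutions_alt, PySem.List.len_eq]
  rw [pvA_eq_flatten]
  by_cases hsi : 0 ≤ si ∧ si < (pal.length : Int)
  · rw [if_pos hsi]
    have hlt : si.toNat < pal.length := by omega
    -- split off row 0 of A
    have h016 : PySem.List.pyRange 0 16 1 = 0 :: PySem.List.pyRange 1 16 1 :=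
      PySem.List.pyRange_one_cons (by norm_num)
    rw [h016, List.map_cons, List.flatten_cons, pvRowA_zero_lt pal si 0 (by norm_num)]
    -- B: pyRepeat = pal ++ 15 replicated copies, then the patch lemma
    have hrep : PySem.List.pyRepeat pal 16 = pal ++ (List.replicate 15 pal).flatten := by
      show (List.replicate (Int.toNat 16) pal).flatten = _
      rw [show Int.toNat 16 = 15 + 1 from rfl, List.replicate_succ, List.flatten_cons]
    have hpatch := pvPatch_flatten pal si
      (fun i => if i - 1 = si then "0007" else PySem.List.pyGetD pal (i - 1) "")
      hsi.1 hlt 15 1 pal (by norm_num) (by simp)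
    norm_num at hpatch
    rw [hrep, hpatch]
    refine congrArg (pal ++ ·) (congrArg List.flatten (List.map_congr_left ?_))
    intro i hi
    have hm := (PySem.List.mem_pyRange_one).1 hi
    exact pvRowA_hit pal si i (by omega) hsi
  · rw [if_neg hsi]
    have hrows : (PySem.List.pyRange 0 16 1).map (pvRowA pal si)
        = List.replicate 16 pal := by
      rw [List.map_congr_left (g := fun _ => pal)]
      · rw [List.map_const', PySem.List.length_pyRange_one]; rfl
      · intro i _; exact pvRowA_no_hit pal si i hsi
    rw [hrows]
    show _ = (List.replicate (Int.toNat 16) pal).flatten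
    rw [show Int.toNat 16 = 16 from rfl]

-- ===== VERDICT (by name: the statement is the Claim_ definition above) =====
theorem create_palette_substitutions_spec : Claim_equal_create_palette_substitutions := by
  intro pal si _ _
  exact create_palette_substitutions_spec_proof pal si
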